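-- pv_equiv track=rewrite | github.com/annaapisarek/song-lyrics-analysis | api_functions.py | clean_artist_name
-- ===== SOURCE A (Python) =====
-- def clean_artist_name(artist):
--     """Remove 'FEATURING' or 'FEAT.' and everything after it from artist name"""
--     # List of possible featuring indicators
--     featuring_terms = ['FEATURING', 'FEAT.', 'FEAT', 'FT.', 'FT', 'INTRODUCING', 'WITH', 'X']
--
--     # Convert to uppercase for consistent comparison
--     artist_upper = artist.upper()
--
--     # Find the earliest occurrence of any featuring term
--     min_index = len(artist)
--     for term in featuring_terms:
--         index = artist_upper.find(term)
--         if index != -1 and index < min_index: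
--             min_index = index
--
--     # Return the cleaned artist name, trimmed of whitespace
--     return artist[:min_index].strip()
-- ===== SOURCE B (Python) =====
-- def clean_artist_name(artist):
--     """Remove 'FEATURING' or 'FEAT.' and everything after it from artist name"""
--     terms = ('FEATURING', 'FEAT.', 'FEAT', 'FT.', 'FT', 'INTRODUCING', 'WITH', 'X')
--     upper = artist.upper()
--     # single left-to-right scan: stop at the first position where any term starts
--     for i in range(len(upper)):
--         if upper.startswith(terms, i):
--             return artist[:i].strip()
--     return artist.strip()
-- ===== Notes on version B (the rewrite author's own statement) =====
-- stated objective: alternative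
-- what changed: Replaces eight independent str.find passes plus a running minimum with a single left-to-right scan that returns at the first position where any featuring term starts (str.startswith with a tuple).
import Mathlib
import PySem

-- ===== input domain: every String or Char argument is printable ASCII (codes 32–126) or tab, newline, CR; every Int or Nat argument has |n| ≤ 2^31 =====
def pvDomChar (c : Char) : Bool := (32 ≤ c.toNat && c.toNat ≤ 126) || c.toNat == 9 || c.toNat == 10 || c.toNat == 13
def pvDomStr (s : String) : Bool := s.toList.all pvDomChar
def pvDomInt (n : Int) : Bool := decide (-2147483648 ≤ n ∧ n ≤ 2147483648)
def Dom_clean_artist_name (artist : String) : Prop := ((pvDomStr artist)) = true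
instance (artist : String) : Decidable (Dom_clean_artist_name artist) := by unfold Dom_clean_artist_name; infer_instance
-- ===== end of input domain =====

-- B replaces A's eight separate .find() passes by one left-to-right scan that stops at the
-- first position where any featuring term starts (objective: alternative single-pass algorithm).

-- ===== PORT A =====
def pvTermsA : List String :=
  ["FEATURING", "FEAT.", "FEAT", "FT.", "FT", "INTRODUCING", "WITH", "X"]

def clean_artist_name (artist : String) : String :=
  let artist_upper := PySem.Str.upper artist
  let min_index : Int := pvTermsA.foldl
    (fun m term =>
      let index := PySem.Str.find artist_upper term
      if index ≠ -1 ∧ index < m then index else m)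
    (PySem.Str.len artist : Int)
  PySem.Str.strip (PySem.Str.slice artist none (some min_index))

-- ===== PORT B =====
def pvTermsB : List (List Char) :=
  ["FEATURING".toList, "FEAT.".toList, "FEAT".toList, "FT.".toList, "FT".toList,
   "INTRODUCING".toList, "WITH".toList, "X".toList]

-- the 'for i in range(len(upper))' loop: walk the suffixes of the uppercased string
def pvScan : List Char → Nat → Option Nat
  | [], _ => none
  | s@(_ :: rest), i =>
      if pvTermsB.any (fun t => PySem.Chars.startswith s t) then some i
      else pvScan rest (i + 1)

def clean_artist_name_alt (artist : String) : String :=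
  match pvScan (PySem.Chars.upper artist.toList) 0 with
  | some i => String.ofList (PySem.Chars.strip (artist.toList.take i))
  | none => PySem.Str.strip artist

-- ===== PRECONDITION & SPEC =====
def Spec_clean_artist_name (artist : String) (out : String) : Prop := out = clean_artist_name_alt artist
instance (artist : String) (out : String) : Decidable (Spec_clean_artist_name artist out) := by unfold Spec_clean_artist_name; infer_instance

-- ===== CLAIM (what is proved, stated in full; the proofs are below) =====
def Claim_equal_clean_artist_name : Prop := ∀ (artist : String), Dom_clean_artist_name artist → Spec_clean_artist_name artist (clean_artist_name artist)

-- ===== LEMMAS AND PROOFS =====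

-- "some featuring term starts at position j of u"
def pvHit (u : List Char) (j : Nat) : Prop := ∃ t ∈ pvTermsB, t <+: u.drop j

theorem pvTerms_map : pvTermsA.map String.toList = pvTermsB := by decide

theorem pvTermsB_ne_nil : ∀ t ∈ pvTermsB, t ≠ [] := by decide

-- characterisation of A's fold: the result is ≤ its seed, is the seed or one of the finds,
-- and is a lower bound of every successful find
theorem pvFoldA (u : List Char) :
    ∀ (ts : List (List Char)) (m : Int),
      let g := ts.foldl (fun m t =>
        if PySem.Chars.find u t ≠ -1 ∧ PySem.Chars.find u t < m
        then PySem.Chars.find u t else m) m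
      g ≤ m ∧ (g = m ∨ ∃ t ∈ ts, PySem.Chars.find u t = g ∧ g ≠ -1) ∧
        (∀ t ∈ ts, PySem.Chars.find u t ≠ -1 → g ≤ PySem.Chars.find u t) := by
  intro ts
  induction ts with
  | nil => intro m; exact ⟨le_refl _, Or.inl rfl, by simp⟩
  | cons t ts ih =>
    intro m
    simp only [List.foldl_cons]
    by_cases h : PySem.Chars.find u t ≠ -1 ∧ PySem.Chars.find u t < m
    · rw [if_pos h]
      obtain ⟨h1, h2, h3⟩ := ih (PySem.Chars.find u t)
      refine ⟨le_trans h1 (le_of_lt h.2), ?_, ?_⟩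
      · rcases h2 with h2 | ⟨t', ht', hf, hn⟩
        · exact Or.inr ⟨t, List.mem_cons_self, h2.symm, by rw [h2]; exact h.1⟩
        · exact Or.inr ⟨t', List.mem_cons_of_mem _ ht', hf, hn⟩
      · intro t' ht' hne
        rcases List.mem_cons.mp ht' with rfl | ht'
        · exact h1
        · exact h3 t' ht' hne
    · rw [if_neg h]
      obtain ⟨h1, h2, h3⟩ := ih m
      refine ⟨h1, ?_, ?_⟩
      · rcases h2 with h2 | ⟨t', ht', hf, hn⟩
        · exact Or.inl h2
        · exact Or.inr ⟨t', List.mem_cons_of_mem _ ht', hf, hn⟩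
      · intro t' ht' hne
        rcases List.mem_cons.mp ht' with rfl | ht'
        · rcases not_and_or.mp h with h' | h'
          · exact absurd hne h'
          · exact le_trans h1 (le_of_not_gt h')
        · exact h3 t' ht' hne

theorem pvHit_iff (u : List Char) (j : Nat) :
    pvHit u j ↔ pvTermsB.any (fun t => PySem.Chars.startswith (u.drop j) t) = true := by
  simp [pvHit, List.any_eq_true, PySem.Chars.startswith_iff]

-- characterisation of B's scan: a result is the first hit position, none means no hit at all
theorem pvScan_some (u : List Char) :
    ∀ (s : List Char) (k i j : Nat), u.drop k = s → pvScan s i = some j →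
      i ≤ j ∧ pvHit u (k + (j - i)) ∧ ∀ l < j - i, ¬ pvHit u (k + l) := by
  intro s
  induction s generalizing u with
  | nil => intro k i j _ h; simp [pvScan] at h
  | cons c rest ih =>
    intro k i j hk h
    have hrest : u.drop (k + 1) = rest := by
      rw [← List.drop_drop, hk]; rfl
    by_cases hg : pvTermsB.any (fun t => PySem.Chars.startswith (c :: rest) t) = true
    · rw [pvScan, if_pos hg] at h
      obtain rfl : i = j := by injection h
      refine ⟨le_refl _, ?_, by omega⟩
      simp only [Nat.sub_self, Nat.add_zero]
      rw [pvHit_iff, hk]; exact hg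
    · rw [pvScan, if_neg hg] at h
      obtain ⟨h1, h2, h3⟩ := ih (u := u) (k + 1) (i + 1) j hrest h
      refine ⟨by omega, ?_, ?_⟩
      · have e : k + 1 + (j - (i + 1)) = k + (j - i) := by omega
        rwa [e] at h2
      · intro l hl
        match l with
        | 0 =>
          simp only [Nat.add_zero]
          rw [pvHit_iff, hk]; exact fun hc => hg hc
        | Nat.succ l' =>
          have := h3 l' (by omega)
          have e : k + 1 + l' = k + (l' + 1) := by omega
          rwa [e] at this

theorem pvScan_none (u : List Char) :
    ∀ (s : List Char) (k i : Nat), u.drop k = s → pvScan s i = none →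
      ∀ l, ¬ pvHit u (k + l) := by
  intro s
  induction s generalizing u with
  | nil =>
    intro k i hk _ l hl
    obtain ⟨t, ht, hp⟩ := hl
    have hlen : u.length ≤ k := by
      have h2 := congrArg List.length hk; simp at h2; omega
    have : u.drop (k + l) = [] := by
      apply List.drop_eq_nil_of_le; omega
    rw [this] at hp
    exact pvTermsB_ne_nil t ht (List.prefix_nil.mp hp)
  | cons c rest ih =>
    intro k i hk h
    have hrest : u.drop (k + 1) = rest := by
      rw [← List.drop_drop, hk]; rfl
    by_cases hg : pvTermsB.any (fun t => PySem.Chars.startswith (c :: rest) t) = true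
    · rw [pvScan, if_pos hg] at h; exact absurd h (by simp)
    · rw [pvScan, if_neg hg] at h
      intro l
      match l with
      | 0 =>
        simp only [Nat.add_zero]
        rw [pvHit_iff, hk]; exact fun hc => hg hc
      | Nat.succ l' =>
        have := ih (u := u) (k + 1) (i + 1) hrest h l'
        have e : k + 1 + l' = k + (l' + 1) := by omega
        rwa [e] at this

-- a hit at j means the term occurs in u, and its first occurrence is ≤ j
theorem pvFind_le_of_hit (u : List Char) (j : Nat) (t : List Char)
    (ht : t <+: u.drop j) : 0 ≤ PySem.Chars.find u t ∧ PySem.Chars.find u t ≤ (j : Int) := by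
  have hfind : PySem.Chars.find u t ≠ -1 := by
    rw [PySem.Chars.find_ne_neg_one_iff, ← PySem.Chars.isIn_iff_infix,
      ← PySem.Chars.exists_prefix_drop_iff_isIn]
    exact ⟨j, ht⟩
  have h0 : 0 ≤ PySem.Chars.find u t := by
    have := PySem.Chars.neg_one_le_find u t; omega
  refine ⟨h0, ?_⟩
  obtain ⟨_, hmin⟩ := PySem.Chars.find_spec (s := u) (sub := t) h0
  by_contra hlt
  exact hmin j (by omega) ht

theorem pvStrSlice_toList (artist : String) (b : Int) (hb : 0 ≤ b) :
    (PySem.Str.slice artist none (some b)).toList = artist.toList.take b.toNat := by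
  rw [PySem.Str.toList_slice, PySem.Chars.slice_eq_listSlice, PySem.List.slice_to _ hb]

-- ===== VERDICT (by name: the statement is the Claim_ definition above) =====
theorem clean_artist_name_spec : Claim_equal_clean_artist_name := by
  intro artist _
  unfold Spec_clean_artist_name clean_artist_name clean_artist_name_alt
  simp only []
  set u := PySem.Chars.upper artist.toList with hu
  have hul : u.length = artist.toList.length := by simp [hu, PySem.Chars.upper]
  have hup : (PySem.Str.upper artist).toList = u := by simp [hu]
  set L : Int := (artist.toList.length : Int) with hL
  -- A's fold, moved to the Chars side over pvTermsB
  have hfold : pvTermsA.foldl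
      (fun m term =>
        let index := PySem.Str.find (PySem.Str.upper artist) term
        if index ≠ -1 ∧ index < m then index else m) (PySem.Str.len artist : Int)
      = pvTermsB.foldl
      (fun m t => if PySem.Chars.find u t ≠ -1 ∧ PySem.Chars.find u t < m
        then PySem.Chars.find u t else m) L := by
    rw [← pvTerms_map, List.foldl_map]
    simp [PySem.Str.len, hup, hL]
  rw [hfold]
  obtain ⟨hle, heq, hmin⟩ := pvFoldA u pvTermsB L
  set g := pvTermsB.foldl
      (fun m t => if PySem.Chars.find u t ≠ -1 ∧ PySem.Chars.find u t < m
        then PySem.Chars.find u t else m) L with hg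
  have hg0 : 0 ≤ g := by
    rcases heq with h | ⟨t, _, hf, hne⟩
    · rw [h, hL]; positivity
    · have := PySem.Chars.neg_one_le_find u t; omega
  cases hscan : pvScan u 0 with
  | some j =>
    obtain ⟨_, hhit, hno⟩ := pvScan_some u u 0 0 j (by simp) hscan
    simp only [Nat.zero_add, Nat.sub_zero] at hhit hno
    obtain ⟨t, htm, htp⟩ := hhit
    have hjlen : j < u.length := by
      by_contra hc
      rw [List.drop_eq_nil_of_le (by omega)] at htp
      exact pvTermsB_ne_nil t htm (List.prefix_nil.mp htp)
    obtain ⟨hf0, hfle⟩ := pvFind_le_of_hit u j t htp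
    have hgj : g ≤ (j : Int) := le_trans (hmin t htm (by omega)) hfle
    have hjg : (j : Int) ≤ g := by
      by_contra hc
      replace hc : g < (j : Int) := lt_of_not_ge hc
      rcases heq with h | ⟨t', ht'm, hf', hne'⟩
      · rw [h] at hc; rw [hL] at hc; omega
      · have h0' : 0 ≤ PySem.Chars.find u t' := by
          have := PySem.Chars.neg_one_le_find u t'; omega
        obtain ⟨hpre, _⟩ := PySem.Chars.find_spec (s := u) (sub := t') h0'
        refine hno (PySem.Chars.find u t').toNat ?_ ⟨t', ht'm, hpre⟩
        omega
    have hgj' : g = (j : Int) := le_antisymm hgj hjg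
    rw [hgj']
    calc PySem.Str.strip (PySem.Str.slice artist none (some (j : Int)))
        = String.ofList (PySem.Str.strip (PySem.Str.slice artist none (some (j : Int)))).toList :=
          String.ofList_toList.symm
      _ = String.ofList (PySem.Chars.strip (artist.toList.take j)) := by
          rw [PySem.Str.toList_strip, pvStrSlice_toList artist (j : Int) (by positivity)]
          simp
  | none =>
    have hnone := pvScan_none u u 0 0 (by simp) hscan
    simp only [Nat.zero_add] at hnone
    have hgL : g = L := by
      rcases heq with h | ⟨t, htm, hf, hne⟩
      · exact h
      · exfalso
        have h0' : 0 ≤ PySem.Chars.find u t := by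
          have := PySem.Chars.neg_one_le_find u t; omega
        obtain ⟨hpre, _⟩ := PySem.Chars.find_spec (s := u) (sub := t) h0'
        exact hnone (PySem.Chars.find u t).toNat ⟨t, htm, hpre⟩
    rw [hgL]
    calc PySem.Str.strip (PySem.Str.slice artist none (some L))
        = String.ofList (PySem.Str.strip (PySem.Str.slice artist none (some L))).toList :=
          String.ofList_toList.symm
      _ = PySem.Str.strip artist := by
          rw [PySem.Str.toList_strip, pvStrSlice_toList artist L (by rw [hL]; positivity)]
          have ht : L.toNat = artist.toList.length := by rw [hL]; simp
          rw [ht, List.take_length, ← PySem.Str.toList_strip, String.ofList_toList]
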